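-- pv_equiv track=rewrite | github.com/AllenHuang03/qlib | backend/australian_feature_engineering.py | _generate_feature_descriptions
-- ===== SOURCE A (Python) =====
-- from typing import Dict, List, Optional, Any, Tuple
--
-- def _generate_feature_descriptions(feature_names: List[str]) -> Dict[str, str]:
--     """Generate descriptions for all features"""
--     descriptions = {}
--
--     # Basic technical features
--     technical_patterns = {
--         'returns_': 'Price return over specified period',
--         'ma_': 'Moving average over specified period',
--         'ma_ratio_': 'Ratio of moving averages',
--         'volatility_': 'Return volatility over specified period',
--         'volume_': 'Volume-based indicator',
--         'rsi_': 'Relative Strength Index',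
--         'macd': 'MACD indicator',
--         'bb_': 'Bollinger Bands indicator'
--     }
--
--     # Australian specific features
--     au_patterns = {
--         'is_asx200': 'ASX200 index membership indicator',
--         'market_cap_tier': 'Market capitalization tier classification',
--         'dividend_season_proximity': 'Proximity to Australian dividend season',
--         'franking_benefit': 'Franking credit benefit score',
--         'is_resources': 'Resources sector classification',
--         'china_trade_exposure': 'China trade exposure score',
--         'is_big4_bank': 'Big 4 Australian bank indicator',
--         'financial_year_effect': 'Australian financial year seasonality',
--         'reporting_season_impact': 'Corporate reporting season impact'
--     }
--
--     for feature_name in feature_names: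
--         description = "Feature description not available"
--
--         # Check technical patterns
--         for pattern, desc in technical_patterns.items():
--             if pattern in feature_name:
--                 description = desc
--                 break
--
--         # Check Australian patterns
--         for pattern, desc in au_patterns.items():
--             if pattern in feature_name:
--                 description = desc
--                 break
--
--         descriptions[feature_name] = description
--
--     return descriptions
-- ===== SOURCE B (Python) =====
-- from typing import Dict, List, Optional, Any, Tuple
--
-- _DEFAULT_DESC = "Feature description not available"
--
-- # One merged, ordered pattern table: Australian patterns first (they override
-- # technical matches in the original), then technical patterns.
-- _PATTERNS = [
--     ('is_asx200', 'ASX200 index membership indicator'),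
--     ('market_cap_tier', 'Market capitalization tier classification'),
--     ('dividend_season_proximity', 'Proximity to Australian dividend season'),
--     ('franking_benefit', 'Franking credit benefit score'),
--     ('is_resources', 'Resources sector classification'),
--     ('china_trade_exposure', 'China trade exposure score'),
--     ('is_big4_bank', 'Big 4 Australian bank indicator'),
--     ('financial_year_effect', 'Australian financial year seasonality'),
--     ('reporting_season_impact', 'Corporate reporting season impact'),
--     ('returns_', 'Price return over specified period'),
--     ('ma_', 'Moving average over specified period'),
--     ('ma_ratio_', 'Ratio of moving averages'),
--     ('volatility_', 'Return volatility over specified period'),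
--     ('volume_', 'Volume-based indicator'),
--     ('rsi_', 'Relative Strength Index'),
--     ('macd', 'MACD indicator'),
--     ('bb_', 'Bollinger Bands indicator'),
-- ]
--
-- def _generate_feature_descriptions(feature_names):
--     """Generate descriptions for all features (single pass over one merged table)."""
--     return {
--         name: next((d for p, d in _PATTERNS if p in name), _DEFAULT_DESC)
--         for name in feature_names
--     }
-- ===== Notes on version B (the rewrite author's own statement) =====
-- stated objective: simpler
-- what changed: Replaces the two sequential break-loops over separate technical/Australian dicts (where an Australian match silently overwrites a technical one) with a single first-match lookup over one merged ordered pattern table (Australian patterns first), expressed as a dict comprehension with next().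
import Mathlib
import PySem

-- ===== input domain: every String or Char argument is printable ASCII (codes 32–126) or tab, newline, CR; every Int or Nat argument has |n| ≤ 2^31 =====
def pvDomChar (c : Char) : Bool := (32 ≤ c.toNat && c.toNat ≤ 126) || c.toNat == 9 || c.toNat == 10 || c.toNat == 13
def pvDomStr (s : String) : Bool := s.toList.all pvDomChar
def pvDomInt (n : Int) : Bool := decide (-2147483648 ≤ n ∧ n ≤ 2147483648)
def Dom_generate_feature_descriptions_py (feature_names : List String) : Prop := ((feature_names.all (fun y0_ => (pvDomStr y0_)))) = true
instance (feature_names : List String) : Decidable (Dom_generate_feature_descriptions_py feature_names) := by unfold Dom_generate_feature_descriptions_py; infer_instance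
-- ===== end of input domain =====

-- ===== PORT A =====
-- One honest line: B replaces A's two sequential break-loops over separate pattern
-- dicts with a single first-match scan over one merged ordered table (simpler).

def pvTechPatterns : List (String × String) :=
  [("returns_", "Price return over specified period"),
   ("ma_", "Moving average over specified period"),
   ("ma_ratio_", "Ratio of moving averages"),
   ("volatility_", "Return volatility over specified period"),
   ("volume_", "Volume-based indicator"),
   ("rsi_", "Relative Strength Index"),
   ("macd", "MACD indicator"),
   ("bb_", "Bollinger Bands indicator")]

def pvAuPatterns : List (String × String) :=
  [("is_asx200", "ASX200 index membership indicator"),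
   ("market_cap_tier", "Market capitalization tier classification"),
   ("dividend_season_proximity", "Proximity to Australian dividend season"),
   ("franking_benefit", "Franking credit benefit score"),
   ("is_resources", "Resources sector classification"),
   ("china_trade_exposure", "China trade exposure score"),
   ("is_big4_bank", "Big 4 Australian bank indicator"),
   ("financial_year_effect", "Australian financial year seasonality"),
   ("reporting_season_impact", "Corporate reporting season impact")]

-- 'for pattern, desc in pats.items(): if pattern in name: description = desc; break'
def pvScan (pats : List (String × String)) (name : String) (description : String) : String :=
  match pats with
  | [] => description
  | (pattern, desc) :: rest =>
      if PySem.Str.isIn pattern name then desc else pvScan rest name description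

def generate_feature_descriptions_py (feature_names : List String) : List (String × String) :=
  (feature_names.foldl (fun descriptions feature_name =>
      let description := "Feature description not available"
      let description := pvScan pvTechPatterns feature_name description
      let description := pvScan pvAuPatterns feature_name description
      descriptions.insert feature_name description)
    (PySem.Dict.empty : PySem.Dict String String)).items

-- ===== PORT B =====
def pvMergedPatterns : List (String × String) :=
  [("is_asx200", "ASX200 index membership indicator"),
   ("market_cap_tier", "Market capitalization tier classification"),
   ("dividend_season_proximity", "Proximity to Australian dividend season"),
   ("franking_benefit", "Franking credit benefit score"),
   ("is_resources", "Resources sector classification"),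
   ("china_trade_exposure", "China trade exposure score"),
   ("is_big4_bank", "Big 4 Australian bank indicator"),
   ("financial_year_effect", "Australian financial year seasonality"),
   ("reporting_season_impact", "Corporate reporting season impact"),
   ("returns_", "Price return over specified period"),
   ("ma_", "Moving average over specified period"),
   ("ma_ratio_", "Ratio of moving averages"),
   ("volatility_", "Return volatility over specified period"),
   ("volume_", "Volume-based indicator"),
   ("rsi_", "Relative Strength Index"),
   ("macd", "MACD indicator"),
   ("bb_", "Bollinger Bands indicator")]

-- 'next((d for p, d in _PATTERNS if p in name), _DEFAULT_DESC)'
def generate_feature_descriptions_py_alt (feature_names : List String) : List (String × String) :=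
  (feature_names.foldl (fun d name =>
      d.insert name
        (((pvMergedPatterns.find? (fun pd => PySem.Str.isIn pd.1 name)).map Prod.snd).getD
          "Feature description not available"))
    (PySem.Dict.empty : PySem.Dict String String)).items

-- ===== PRECONDITION & SPEC =====
def Spec_generate_feature_descriptions_py (feature_names : List String) (out : List (String × String)) : Prop := out = generate_feature_descriptions_py_alt feature_names
instance (feature_names : List String) (out : List (String × String)) : Decidable (Spec_generate_feature_descriptions_py feature_names out) := by unfold Spec_generate_feature_descriptions_py; infer_instance

-- ===== CLAIM =====
def Claim_equal_generate_feature_descriptions_py : Prop := ∀ (feature_names : List String), Dom_generate_feature_descriptions_py feature_names → Spec_generate_feature_descriptions_py feature_names (generate_feature_descriptions_py feature_names)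

-- ===== LEMMAS AND PROOFS =====

theorem pvScan_eq_find? (pats : List (String × String)) (name d0 : String) :
    pvScan pats name d0 =
      ((pats.find? (fun pd => PySem.Str.isIn pd.1 name)).map Prod.snd).getD d0 := by
  induction pats with
  | nil => rfl
  | cons hd tl ih =>
      obtain ⟨p, d⟩ := hd
      by_cases h : PySem.Chars.isIn p.toList name.toList
      · simp [pvScan, List.find?, h]
      · simp [pvScan, List.find?, h, ih]

theorem pvMerged_eq : pvMergedPatterns = pvAuPatterns ++ pvTechPatterns := rfl

theorem pvBody_eq (name : String) :
    pvScan pvAuPatterns name (pvScan pvTechPatterns name "Feature description not available") =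
      ((pvMergedPatterns.find? (fun pd => PySem.Str.isIn pd.1 name)).map Prod.snd).getD
        "Feature description not available" := by
  rw [pvMerged_eq, pvScan_eq_find?, pvScan_eq_find?, List.find?_append]
  cases pvAuPatterns.find? (fun pd => PySem.Str.isIn pd.1 name) <;> simp

-- ===== VERDICT =====
theorem generate_feature_descriptions_py_spec : Claim_equal_generate_feature_descriptions_py := by
  intro feature_names _
  show _ = _
  unfold generate_feature_descriptions_py generate_feature_descriptions_py_alt
  congr 2
  funext d name
  exact congrArg (d.insert name) (pvBody_eq name)
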